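-- pv_equiv track=rewrite | github.com/morecitricacid-coder/engram | engram/surfacer.py | _parse_recall_text
-- ===== SOURCE A (Python) =====
-- def _parse_recall_text(recall_text):
--     lines = recall_text.strip().split("\n")
--     entity, snippets = "", []
--     for line in lines:
--         if line.startswith('- "'): entity = line.split('"')[1] if '"' in line else ""
--         elif line.strip().startswith("> "):
--             content = line.strip()[2:]
--             ci = content.find(": ")
--             if ci > 0: snippets.append((content[:ci], content[ci+2:]))
--     return entity, snippets
-- ===== SOURCE B (Python) =====
-- def _parse_recall_text(recall_text):
--     lines = recall_text.strip().split("\n")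
--     # entity pass: last '- "' line wins, so scan from the end and stop at the first hit
--     entity = next((ln.split('"')[1] for ln in reversed(lines) if ln.startswith('- "')), "")
--
--     # snippet pass: independent of the entity pass ('- "' lines can never look like '> ' lines)
--     def snip(ln):
--         s = ln.strip()
--         if s.startswith("> "):
--             c = s[2:]
--             i = c.find(": ")
--             if i > 0:
--                 return (c[:i], c[i + 2:])
--         return None
--
--     snippets = [t for t in map(snip, lines) if t is not None]
--     return entity, snippets
-- ===== Notes on version B (the rewrite author's own statement) =====
-- stated objective: simpler
-- what changed: Replaces A's single fused stateful loop by two independent passes: a backwards scan (next over reversed) that stops at the last entity line, and a filter-map pass building the snippet pairs, dropping a membership re-check that the entity-line prefix already guarantees.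
import Mathlib
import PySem

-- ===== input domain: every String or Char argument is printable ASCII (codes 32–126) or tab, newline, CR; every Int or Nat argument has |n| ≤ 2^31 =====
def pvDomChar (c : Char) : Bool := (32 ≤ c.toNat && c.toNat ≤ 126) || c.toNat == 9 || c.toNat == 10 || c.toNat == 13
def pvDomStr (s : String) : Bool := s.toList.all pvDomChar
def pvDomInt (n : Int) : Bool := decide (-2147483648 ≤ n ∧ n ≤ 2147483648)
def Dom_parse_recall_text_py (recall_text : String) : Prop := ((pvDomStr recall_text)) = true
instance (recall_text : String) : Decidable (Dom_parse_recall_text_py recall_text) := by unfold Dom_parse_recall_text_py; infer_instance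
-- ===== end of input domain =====

-- B replaces A's fused stateful loop by two independent passes (backwards scan for the
-- entity, filter-map for the snippets): simpler decomposition, same O(n) cost.


-- ===== PORT A =====
-- one step of A's loop over the lines, state = (entity, snippets)
def pvStepA (st : String × List (String × String)) (line : String) :
    String × List (String × String) :=
  if PySem.Str.startswith line "- \"" then
    -- line.split('"')[1]: IndexError unreachable ('"' ∈ line gives ≥ 2 parts), so getD "" is exact
    (if PySem.Str.isIn "\"" line then ((PySem.Str.split? line "\"").getD []).getD 1 "" else "",
     st.2)
  else if PySem.Str.startswith (PySem.Str.strip line) "> " then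
    -- content := strip(line)[2:], ci := content.find(": "), written out inline
    if PySem.Str.find (PySem.Str.slice (PySem.Str.strip line) (some 2) none) ": " > 0 then
      (st.1, st.2 ++ [(PySem.Str.slice (PySem.Str.slice (PySem.Str.strip line) (some 2) none) none
                         (some (PySem.Str.find (PySem.Str.slice (PySem.Str.strip line) (some 2) none) ": ")),
                       PySem.Str.slice (PySem.Str.slice (PySem.Str.strip line) (some 2) none)
                         (some (PySem.Str.find (PySem.Str.slice (PySem.Str.strip line) (some 2) none) ": " + 2)) none)])
    else st
  else st

def parse_recall_text_py (recall_text : String) : String × (List (String × String)) :=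
  -- .split("\n"): sep ≠ "" so split? is always some
  let lines := (PySem.Str.split? (PySem.Str.strip recall_text) "\n").getD []
  lines.foldl pvStepA ("", [])

-- ===== PORT B =====
-- B's snip helper: Some snippet pair, or none
def pvSnipB (ln : String) : Option (String × String) :=
  -- s := strip(ln), c := s[2:], i := c.find(": "), written out inline
  if PySem.Str.startswith (PySem.Str.strip ln) "> " then
    if PySem.Str.find (PySem.Str.slice (PySem.Str.strip ln) (some 2) none) ": " > 0 then
      some (PySem.Str.slice (PySem.Str.slice (PySem.Str.strip ln) (some 2) none) none
              (some (PySem.Str.find (PySem.Str.slice (PySem.Str.strip ln) (some 2) none) ": ")),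
            PySem.Str.slice (PySem.Str.slice (PySem.Str.strip ln) (some 2) none)
              (some (PySem.Str.find (PySem.Str.slice (PySem.Str.strip ln) (some 2) none) ": " + 2)) none)
    else none
  else none

def parse_recall_text_py_alt (recall_text : String) : String × (List (String × String)) :=
  let lines := (PySem.Str.split? (PySem.Str.strip recall_text) "\n").getD []
  let entity :=
    match lines.reverse.find? (fun ln => PySem.Str.startswith ln "- \"") with
    | some ln => ((PySem.Str.split? ln "\"").getD []).getD 1 ""
    | none => ""
  let snippets := (lines.map pvSnipB).filterMap id
  (entity, snippets)

-- ===== PRECONDITION & SPEC =====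
def Spec_parse_recall_text_py (recall_text : String) (out : String × (List (String × String))) : Prop := out = parse_recall_text_py_alt recall_text
instance (recall_text : String) (out : String × (List (String × String))) : Decidable (Spec_parse_recall_text_py recall_text out) := by unfold Spec_parse_recall_text_py; infer_instance

-- ===== CLAIM (what is proved, stated in full; the proofs are below) =====
def Claim_equal_parse_recall_text_py : Prop := ∀ (recall_text : String), Dom_parse_recall_text_py recall_text → Spec_parse_recall_text_py recall_text (parse_recall_text_py recall_text)

-- ===== LEMMAS AND PROOFS =====

-- rstrip keeps a non-space head
theorem pvRstrip_cons (c : Char) (t : List Char) (hc : PySem.Chars.isspace c = false) :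
    ∃ u, PySem.Chars.rstrip (c :: t) = c :: u := by
  unfold PySem.Chars.rstrip
  rw [List.reverse_cons, List.dropWhile_append]
  by_cases h : (List.dropWhile PySem.Chars.isspace t.reverse).isEmpty
  · exact ⟨[], by simp [h, List.dropWhile, hc]⟩
  · exact ⟨(List.dropWhile PySem.Chars.isspace t.reverse).reverse,
      by simp [h, List.reverse_append]⟩

-- an entity line never looks like a snippet line
theorem pvSnip_of_entity (ln : String) (h : PySem.Str.startswith ln "- \"" = true) :
    pvSnipB ln = none := by
  rw [PySem.Str.startswith_eq, PySem.Chars.startswith_iff] at h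
  obtain ⟨t, ht⟩ := h
  have hlst : ln.toList = '-' :: ' ' :: '"' :: t := by
    rw [← ht]; rfl
  have hstrip : ∃ u, (PySem.Str.strip ln).toList = '-' :: u := by
    rw [PySem.Str.toList_strip, hlst]
    unfold PySem.Chars.strip PySem.Chars.lstrip
    rw [List.dropWhile_cons_of_neg (by decide)]
    exact pvRstrip_cons _ _ (by decide)
  obtain ⟨u, hu⟩ := hstrip
  unfold pvSnipB
  rw [show PySem.Str.startswith (PySem.Str.strip ln) "> " = false from ?_]
  · simp
  · rw [PySem.Str.startswith_eq, hu]
    simp [PySem.Chars.startswith, List.isPrefixOf]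

-- an entity line always contains a quote
theorem pvEntity_isIn (ln : String) (h : PySem.Str.startswith ln "- \"" = true) :
    PySem.Str.isIn "\"" ln = true := by
  rw [PySem.Str.startswith_eq, PySem.Chars.startswith_iff] at h
  obtain ⟨t, ht⟩ := h
  rw [PySem.Str.isIn_iff_infix]
  exact ⟨['-', ' '], t, by rw [← ht]; rfl⟩

-- fold invariant: A's fold equals B's two passes, for any start state
theorem pvFold_eq (lines : List String) (e : String) (sn : List (String × String)) :
    lines.foldl pvStepA (e, sn) =
      ((match lines.reverse.find? (fun ln => PySem.Str.startswith ln "- \"") with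
        | some ln => ((PySem.Str.split? ln "\"").getD []).getD 1 ""
        | none => e),
       sn ++ (lines.map pvSnipB).filterMap id) := by
  induction lines generalizing e sn with
  | nil => simp
  | cons ln rest ih =>
    rw [List.foldl_cons, List.reverse_cons, List.find?_append, List.map_cons]
    by_cases h1 : PySem.Str.startswith ln "- \"" = true
    · have hsnip := pvSnip_of_entity ln h1
      have hin := pvEntity_isIn ln h1
      rw [show pvStepA (e, sn) ln =
            (((PySem.Str.split? ln "\"").getD []).getD 1 "", sn) from by
          unfold pvStepA; rw [if_pos h1, if_pos hin]]
      rw [ih]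
      rw [show List.find? (fun l => PySem.Str.startswith l "- \"") [ln] = some ln from by
        rw [List.find?]; rw [h1]]
      rw [hsnip]
      cases List.find? (fun l => PySem.Str.startswith l "- \"") rest.reverse <;> rfl
    · have hfind : List.find? (fun l => PySem.Str.startswith l "- \"") [ln] = none := by
        rw [List.find?]; rw [Bool.eq_false_iff.mpr h1]; rfl
      rw [hfind]
      by_cases h2 : PySem.Str.startswith (PySem.Str.strip ln) "> " = true
      · by_cases h3 : PySem.Str.find (PySem.Str.slice (PySem.Str.strip ln) (some 2) none) ": " > 0
        · have hstep : pvStepA (e, sn) ln =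
              (e, sn ++ [(PySem.Str.slice (PySem.Str.slice (PySem.Str.strip ln) (some 2) none) none
                            (some (PySem.Str.find (PySem.Str.slice (PySem.Str.strip ln) (some 2) none) ": ")),
                          PySem.Str.slice (PySem.Str.slice (PySem.Str.strip ln) (some 2) none)
                            (some (PySem.Str.find (PySem.Str.slice (PySem.Str.strip ln) (some 2) none) ": " + 2)) none)]) := by
            unfold pvStepA
            rw [if_neg h1, if_pos h2, if_pos h3]
          have hsnip : pvSnipB ln = some
              (PySem.Str.slice (PySem.Str.slice (PySem.Str.strip ln) (some 2) none) none
                 (some (PySem.Str.find (PySem.Str.slice (PySem.Str.strip ln) (some 2) none) ": ")),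
               PySem.Str.slice (PySem.Str.slice (PySem.Str.strip ln) (some 2) none)
                 (some (PySem.Str.find (PySem.Str.slice (PySem.Str.strip ln) (some 2) none) ": " + 2)) none) := by
            unfold pvSnipB
            rw [if_pos h2, if_pos h3]
          rw [hstep, ih, hsnip, List.append_assoc]
          cases List.find? (fun l => PySem.Str.startswith l "- \"") rest.reverse <;> rfl
        · have hstep : pvStepA (e, sn) ln = (e, sn) := by
            unfold pvStepA; rw [if_neg h1, if_pos h2, if_neg h3]
          have hsnip : pvSnipB ln = none := by
            unfold pvSnipB; rw [if_pos h2, if_neg h3]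
          rw [hstep, ih, hsnip]
          cases List.find? (fun l => PySem.Str.startswith l "- \"") rest.reverse <;> rfl
      · have hstep : pvStepA (e, sn) ln = (e, sn) := by
          unfold pvStepA
          rw [if_neg h1, if_neg h2]
        have hsnip : pvSnipB ln = none := by
          unfold pvSnipB; rw [if_neg h2]
        rw [hstep, ih, hsnip]
        cases List.find? (fun l => PySem.Str.startswith l "- \"") rest.reverse <;> rfl

-- ===== VERDICT (by name: the statement is the Claim_ definition above) =====
theorem parse_recall_text_py_spec : Claim_equal_parse_recall_text_py := by
  intro s _
  unfold Spec_parse_recall_text_py parse_recall_text_py parse_recall_text_py_alt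
  simp only [pvFold_eq, List.nil_append]
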